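-- pv_equiv track=rewrite | github.com/StudyForCoding-BJ/BAEKJOON | 08_Math1/Step07/2839.py | sack
-- ===== SOURCE A (Python) =====
-- def sack(n: int):
--     pair = []
--     for a in range ((n//3)+1):
--         if (n - 3*a) % 5 == 0:
--             b = (n - 3*a) // 5
--             pair.append(a+b)
--         else:
--             continue
--     if len(pair) == 0:
--         pair.append(-1)
--     return pair
-- ===== SOURCE B (Python) =====
-- def sack(n: int):
--     a0 = (2 * n) % 5          # smallest a >= 0 with (n - 3*a) % 5 == 0
--     m = n // 3
--     if a0 > m:
--         return [-1]
--     first = a0 + (n - 3 * a0) // 5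
--     k = (m - a0) // 5 + 1
--     return [first + 2 * i for i in range(k)]
-- ===== Notes on version B (the rewrite author's own statement) =====
-- stated objective: simpler
-- what changed: Instead of scanning every candidate count of three-kg bags and testing divisibility of the remainder, B derives the smallest valid count from a closed-form residue computation and emits the answers directly as an arithmetic progression, so the loop-with-test disappears.
import Mathlib
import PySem

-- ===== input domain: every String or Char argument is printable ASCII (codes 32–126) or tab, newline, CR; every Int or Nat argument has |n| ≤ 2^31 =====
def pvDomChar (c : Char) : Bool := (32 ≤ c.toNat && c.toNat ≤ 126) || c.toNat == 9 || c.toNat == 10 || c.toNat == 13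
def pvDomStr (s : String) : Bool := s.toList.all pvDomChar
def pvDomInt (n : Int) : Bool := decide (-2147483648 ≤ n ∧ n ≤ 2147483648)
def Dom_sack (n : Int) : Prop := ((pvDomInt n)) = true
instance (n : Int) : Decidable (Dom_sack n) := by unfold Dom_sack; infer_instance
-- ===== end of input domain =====

-- B replaces A's scan over all a in range(n//3+1) (testing divisibility for each)
-- by a closed-form arithmetic progression: simpler, and no per-element test.

-- ===== PORT A =====
def sack (n : Int) : List Int :=
  let pair : List Int :=
    (PySem.List.pyRange 0 (PySem.Int.floordiv n 3 + 1)).foldl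
      (fun pair a =>
        if PySem.Int.mod (n - 3 * a) 5 == 0 then
          pair ++ [a + PySem.Int.floordiv (n - 3 * a) 5]
        else pair) []
  if pair.length == 0 then pair ++ [-1] else pair

-- ===== PORT B =====
def sack_alt (n : Int) : List Int :=
  let a0 := PySem.Int.mod (2 * n) 5
  let m := PySem.Int.floordiv n 3
  if a0 > m then [-1]
  else
    let first := a0 + PySem.Int.floordiv (n - 3 * a0) 5
    let k := PySem.Int.floordiv (m - a0) 5 + 1
    (PySem.List.pyRange 0 k).map (fun i => first + 2 * i)

-- ===== PRECONDITION & SPEC =====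
def Spec_sack (n : Int) (out : List Int) : Prop := out = sack_alt n
instance (n : Int) (out : List Int) : Decidable (Spec_sack n out) := by unfold Spec_sack; infer_instance

-- ===== CLAIM (what is proved, stated in full; the proofs are below) =====
def Claim_equal_sack : Prop := ∀ (n : Int), Dom_sack n → Spec_sack n (sack n)

-- ===== LEMMAS AND PROOFS =====

-- The elements of range(0, hi) in the residue class of a0 (0 ≤ a0 < 5) form the
-- arithmetic progression a0, a0+5, …, written as a mapped range.
lemma filt (a0 : Int) (h0 : 0 ≤ a0) (h5 : a0 < 5) (hi : Int) (hhi : 0 ≤ hi) :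
    List.filter (fun a => decide (5 ∣ (a - a0))) (PySem.List.pyRange 0 hi) =
    List.map (fun i => a0 + 5 * i)
      (PySem.List.pyRange 0 (if a0 < hi then (hi - 1 - a0) / 5 + 1 else 0)) := by
  induction hi, hhi using Int.le_induction with
  | base =>
      rw [PySem.List.pyRange_one_eq_nil le_rfl, if_neg (by omega),
          PySem.List.pyRange_one_eq_nil le_rfl]
      simp
  | succ hi hhi ih =>
      rw [PySem.List.pyRange_one_succ_right hhi, List.filter_append, ih]
      by_cases hd : (5 : Int) ∣ (hi - a0)
      · have hle : a0 ≤ hi := by rcases hd with ⟨t, ht⟩; omega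
        have e1 : (if a0 < hi + 1 then (hi + 1 - 1 - a0) / 5 + 1 else 0)
            = (if a0 < hi then (hi - 1 - a0) / 5 + 1 else 0) + 1 := by
          rcases hd with ⟨t, ht⟩; split_ifs <;> omega
        have e3 : 0 ≤ (if a0 < hi then (hi - 1 - a0) / 5 + 1 else 0) := by
          split_ifs <;> omega
        have e2 : a0 + 5 * (if a0 < hi then (hi - 1 - a0) / 5 + 1 else 0) = hi := by
          rcases hd with ⟨t, ht⟩; split_ifs <;> omega
        rw [e1, PySem.List.pyRange_one_succ_right e3, List.map_append]
        simp only [List.filter_cons, List.filter_nil, hd, decide_true, if_true,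
          List.map_cons, List.map_nil]
        rw [e2]
      · have hne : a0 ≠ hi := by rintro rfl; exact hd ⟨0, by ring⟩
        have e1 : (if a0 < hi + 1 then (hi + 1 - 1 - a0) / 5 + 1 else 0)
            = (if a0 < hi then (hi - 1 - a0) / 5 + 1 else 0) := by
          split_ifs <;> omega
        rw [e1]
        simp [List.filter, hd]

-- A's per-element divisibility test is membership in the residue class of (2n) % 5.
lemma pred_eq (n : Int) :
    (fun a => PySem.Int.mod (n - 3 * a) 5 == 0) =
    (fun a => decide (5 ∣ (a - PySem.Int.mod (2 * n) 5))) := by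
  funext a
  have h := PySem.Int.floordiv_mul_add_mod (2 * n) 5
  rw [Bool.eq_iff_iff]
  simp only [beq_iff_eq, decide_eq_true_eq]
  rw [PySem.Int.mod_eq_zero_iff_dvd]
  omega

-- ===== VERDICT (by name: the statement is the Claim_ definition above) =====
theorem sack_spec : Claim_equal_sack := by
  unfold Claim_equal_sack Spec_sack
  intro n _
  simp only [sack, sack_alt]
  rw [PySem.List.foldl_append_if (fun a => PySem.Int.mod (n - 3 * a) 5 == 0)
        (fun a => a + PySem.Int.floordiv (n - 3 * a) 5), pred_eq n]
  have h0 : 0 ≤ PySem.Int.mod (2 * n) 5 := PySem.Int.mod_nonneg _ (by norm_num)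
  have h5 : PySem.Int.mod (2 * n) 5 < 5 := PySem.Int.mod_lt _ (by norm_num)
  by_cases hnn : 0 ≤ PySem.Int.floordiv n 3 + 1
  · rw [filt _ h0 h5 _ hnn]
    by_cases hc : PySem.Int.mod (2 * n) 5 > PySem.Int.floordiv n 3
    · rw [if_neg (show ¬ PySem.Int.mod (2 * n) 5 < PySem.Int.floordiv n 3 + 1 by omega),
          if_pos hc, PySem.List.pyRange_one_eq_nil le_rfl]
      simp
    · rw [if_pos (show PySem.Int.mod (2 * n) 5 < PySem.Int.floordiv n 3 + 1 by omega),
          if_neg hc]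
      have hbase : PySem.Int.floordiv n 3 + 1 - 1 - PySem.Int.mod (2 * n) 5
          = PySem.Int.floordiv n 3 - PySem.Int.mod (2 * n) 5 := by ring
      have hfd : PySem.Int.floordiv (PySem.Int.floordiv n 3 - PySem.Int.mod (2 * n) 5) 5
          = (PySem.Int.floordiv n 3 - PySem.Int.mod (2 * n) 5) / 5 :=
        PySem.Int.floordiv_eq_ediv_of_pos (by norm_num)
      rw [hbase, ← hfd, List.nil_append]
      split_ifs with hlen
      · exfalso
        simp only [List.length_map, PySem.List.length_pyRange_one, beq_iff_eq] at hlen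
        rw [hfd] at hlen
        omega
      · rw [List.map_map]
        apply List.map_congr_left
        intro i _
        simp only [Function.comp]
        have d1 : PySem.Int.floordiv (n - 3 * (PySem.Int.mod (2 * n) 5 + 5 * i)) 5
            = (n - 3 * (PySem.Int.mod (2 * n) 5 + 5 * i)) / 5 :=
          PySem.Int.floordiv_eq_ediv_of_pos (by norm_num)
        have d2 : PySem.Int.floordiv (n - 3 * PySem.Int.mod (2 * n) 5) 5
            = (n - 3 * PySem.Int.mod (2 * n) 5) / 5 :=
          PySem.Int.floordiv_eq_ediv_of_pos (by norm_num)
        rw [d1, d2]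
        omega
  · rw [PySem.List.pyRange_one_eq_nil (by omega),
        if_pos (show PySem.Int.floordiv n 3 < PySem.Int.mod (2 * n) 5 by omega)]
    simp
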